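-- pv_equiv track=rewrite | github.com/w3bsuki/amazong | supabase_scan.py | extract
-- ===== SOURCE A (Python) =====
-- def extract(text, keyword):
--     idx = 0
--     names = set()
--     while True:
--         pos = text.find(keyword, idx)
--         if pos == -1:
--             break
--         start = pos + len(keyword)
--         if start >= len(text):
--             break
--         quote = text[start]
--         if quote not in ('"', "'"):
--             idx = start
--             continue
--         i = start + 1
--         name_chars = []
--         while i < len(text):
--             ch = text[i]
--             if ch == '\\' and i + 1 < len(text):
--                 i += 2
--                 continue
--             if ch == quote:
--                 break
--             name_chars.append(ch)
--             i += 1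
--         if name_chars:
--             names.add(''.join(name_chars))
--         idx = i + 1
--     return names
-- ===== SOURCE B (Python) =====
-- def extract(text, keyword):
--     # One-pass character-level state machine: a single index sweeps the text once,
--     # switching between "searching for keyword+quote" and "reading a quoted literal".
--     names = set()
--     n = len(text)
--     k = len(keyword)
--     i = 0
--     mode_quote = None          # None = searching; else the active quote character
--     chars = []
--     while i < n:
--         if mode_quote is None:
--             if text.startswith(keyword, i) and i + k < n:
--                 q = text[i + k]
--                 if q in ('"', "'"):
--                     mode_quote = q
--                     chars = []
--                     i = i + k + 1
--                 else:
--                     i = i + k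
--             else:
--                 i += 1
--         else:
--             c = text[i]
--             if c == '\\' and i + 1 < n:
--                 i += 2
--             elif c == mode_quote:
--                 if chars:
--                     names.add(''.join(chars))
--                 chars = []
--                 mode_quote = None
--                 i += 1
--             else:
--                 chars.append(c)
--                 i += 1
--     if mode_quote is not None and chars:
--         names.add(''.join(chars))
--     return names
-- ===== Notes on version B (the rewrite author's own statement) =====
-- stated objective: alternative
-- what changed: Replaced A's find()-driven outer loop containing a separate inner literal-scanning loop by a single-pass character-level state machine: one index sweeps the text once with an explicit searching/reading mode, an active quote char and a chars buffer.
-- outside the precondition, e.g. on extract('"a"', ''): A returns {'a'}, B returns {'a'}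
import Mathlib
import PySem

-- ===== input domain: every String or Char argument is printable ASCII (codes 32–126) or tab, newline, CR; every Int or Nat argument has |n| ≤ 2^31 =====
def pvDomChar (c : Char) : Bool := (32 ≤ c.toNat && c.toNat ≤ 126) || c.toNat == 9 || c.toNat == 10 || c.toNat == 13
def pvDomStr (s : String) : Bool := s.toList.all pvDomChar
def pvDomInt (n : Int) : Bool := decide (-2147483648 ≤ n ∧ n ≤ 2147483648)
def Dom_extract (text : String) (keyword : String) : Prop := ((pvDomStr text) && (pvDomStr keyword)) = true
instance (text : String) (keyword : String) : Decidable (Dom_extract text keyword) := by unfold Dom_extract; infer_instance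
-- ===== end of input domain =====

-- B replaces A's find()-driven outer loop with nested literal scanner by a single-pass
-- character-level state machine (objective: alternative decomposition, not claimed faster).
-- Python `set` is PySem.Set String; both ports add names in the same textual order.

-- ===== PORT A =====
-- inner `while i < len(text)` literal scanner of A
def extractScan (cs : List Char) (q : Char) (i : Nat) (acc : List Char) : Nat × List Char :=
  if i < cs.length then
    let ch := cs.getD i ' '
    if ch = '\\' ∧ i + 1 < cs.length then extractScan cs q (i + 2) acc
    else if ch = q then (i, acc)
    else extractScan cs q (i + 1) (acc ++ [ch])
  else (i, acc)
termination_by cs.length - i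
decreasing_by all_goals omega

-- outer `while True` of A; fuel bounds the iterations (idx strictly increases for a
-- nonempty keyword, so length+2 iterations always suffice; Pre_ excludes keyword = "")
def extractLoop (cs kw : List Char) : Nat → Nat → PySem.Set String → PySem.Set String
  | 0, _, names => names
  | fuel + 1, idx, names =>
    let pos := PySem.Chars.findFrom cs kw (idx : Int) none
    if pos = -1 then names
    else
      let start := pos.toNat + kw.length
      if start < cs.length then
        let q := cs.getD start ' '
        if q ≠ '"' ∧ q ≠ '\'' then extractLoop cs kw fuel start names
        else
          let p := extractScan cs q (start + 1) []
          extractLoop cs kw fuel (p.1 + 1)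
            (if p.2 ≠ [] then PySem.Set.add names (String.ofList p.2) else names)
      else names

def extract (text : String) (keyword : String) : List String :=
  extractLoop text.toList keyword.toList (text.toList.length + 2) 0 PySem.Set.empty

-- ===== PORT B =====
-- single `while i < n` state machine of Source B: mode = none is "searching",
-- mode = some q is "reading a literal opened by quote q"; same fuel remark as above
def extractAltLoop (cs kw : List Char) :
    Nat → Nat → Option Char → List Char → PySem.Set String → PySem.Set String
  | 0, _, _, _, names => names
  | fuel + 1, i, mode, chars, names =>
    if i < cs.length then
      match mode with
      | none =>
        if kw.isPrefixOf (cs.drop i) = true ∧ i + kw.length < cs.length then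
          let q := cs.getD (i + kw.length) ' '
          if q = '"' ∨ q = '\'' then extractAltLoop cs kw fuel (i + kw.length + 1) (some q) [] names
          else extractAltLoop cs kw fuel (i + kw.length) none chars names
        else extractAltLoop cs kw fuel (i + 1) none chars names
      | some q =>
        let c := cs.getD i ' '
        if c = '\\' ∧ i + 1 < cs.length then extractAltLoop cs kw fuel (i + 2) (some q) chars names
        else if c = q then
          extractAltLoop cs kw fuel (i + 1) none []
            (if chars ≠ [] then PySem.Set.add names (String.ofList chars) else names)
        else extractAltLoop cs kw fuel (i + 1) (some q) (chars ++ [c]) names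
    else
      match mode with
      | none => names
      | some _ => if chars ≠ [] then PySem.Set.add names (String.ofList chars) else names

def extract_alt (text : String) (keyword : String) : List String :=
  extractAltLoop text.toList keyword.toList (text.toList.length + 1) 0 none [] PySem.Set.empty

-- ===== PRECONDITION & SPEC =====
-- Pre_ excludes only the empty keyword, on which A (and B alike) loops forever whenever the
-- current search position is not at a quote; on the few empty-keyword texts where A does
-- return, B returns the same set, but no closed-form condition separates them from divergence.
def Pre_extract (text : String) (keyword : String) : Prop := keyword ≠ ""
instance (text : String) (keyword : String) : Decidable (Pre_extract text keyword) := by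
  unfold Pre_extract; infer_instance

def pvWitness_extract : String × String := ("from(\"users\") and from('x\\'y')", "from(")

def Spec_extract (text : String) (keyword : String) (out : List String) : Prop :=
  out = extract_alt text keyword
instance (text : String) (keyword : String) (out : List String) :
    Decidable (Spec_extract text keyword out) := by unfold Spec_extract; infer_instance

-- ===== CLAIM (what is proved, stated in full; the proofs are below) =====
def Claim_equal_extract : Prop := ∀ (text : String) (keyword : String),
  Dom_extract text keyword → Pre_extract text keyword →
  Spec_extract text keyword (extract text keyword)

-- ===== LEMMAS AND PROOFS =====

-- `if chars: names.add(''.join(chars))`, shared shape of both ports (proof-side name only)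
def pvFlush (chars : List Char) (names : PySem.Set String) : PySem.Set String :=
  if chars ≠ [] then PySem.Set.add names (String.ofList chars) else names

-- canonical runs with always-sufficient fuel
def ARun (cs kw : List Char) (idx : Nat) (names : PySem.Set String) : PySem.Set String :=
  extractLoop cs kw (cs.length + 2) idx names
def BRun (cs kw : List Char) (i : Nat) (mode : Option Char) (chars : List Char)
    (names : PySem.Set String) : PySem.Set String :=
  extractAltLoop cs kw (cs.length + 1) i mode chars names

theorem findFrom_past (cs kw : List Char) (idx : Nat) (h : cs.length < idx) :
    PySem.Chars.findFrom cs kw (idx : Int) none = -1 := by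
  simp only [PySem.Chars.findFrom]
  rw [if_neg (by omega : ¬ ((idx:Int) < 0)), if_pos (by exact_mod_cast h)]

theorem scan_ge (cs : List Char) (q : Char) (i : Nat) (acc : List Char) :
    i ≤ (extractScan cs q i acc).1 := by
  fun_induction extractScan cs q i acc
  all_goals omega

theorem scan_le (cs : List Char) (q : Char) (i : Nat) (acc : List Char) :
    (extractScan cs q i acc).1 ≤ max cs.length i := by
  fun_induction extractScan cs q i acc
  all_goals omega

theorem loopA_fuel (cs kw : List Char) (hk : kw ≠ []) :
    ∀ f1 f2 idx names, cs.length - idx < f1 → cs.length - idx < f2 → idx ≤ cs.length + 1 →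
    extractLoop cs kw f1 idx names = extractLoop cs kw f2 idx names := by
  have hk1 : 1 ≤ kw.length := List.length_pos_iff.mpr hk
  intro f1
  induction f1 with
  | zero => intro f2 idx names h1 h2 h3; omega
  | succ f ih =>
    intro f2 idx names h1 h2 h3
    cases f2 with
    | zero => omega
    | succ f2 =>
      simp only [extractLoop]
      by_cases hpos : PySem.Chars.findFrom cs kw (idx : Int) none = -1
      · simp only [if_pos hpos]
      · simp only [if_neg hpos]
        have hidx : idx ≤ cs.length := by
          by_contra hgt
          exact hpos (findFrom_past cs kw idx (by omega))
        obtain ⟨hge, hpre, -⟩ := PySem.Chars.findFrom_natCast_spec cs kw idx hidx hpos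
        set pos := PySem.Chars.findFrom cs kw (idx:Int) none with hposdef
        have hgeN : idx ≤ pos.toNat := by omega
        by_cases hs : pos.toNat + kw.length < cs.length
        · simp only [if_pos hs]
          by_cases hq : cs.getD (pos.toNat + kw.length) ' ' ≠ '"' ∧ cs.getD (pos.toNat + kw.length) ' ' ≠ '\''
          · simp only [if_pos hq]; exact ih f2 _ _ (by omega) (by omega) (by omega)
          · simp only [if_neg hq]
            have hge2 := scan_ge cs (cs.getD (pos.toNat + kw.length) ' ') (pos.toNat + kw.length + 1) []
            have hle2 := scan_le cs (cs.getD (pos.toNat + kw.length) ' ') (pos.toNat + kw.length + 1) []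
            exact ih f2 _ _ (by omega) (by omega) (by omega)
        · simp only [if_neg hs]

theorem loopB_fuel (cs kw : List Char) (hk : kw ≠ []) :
    ∀ f1 f2 i mode chars names, cs.length - i < f1 → cs.length - i < f2 →
    extractAltLoop cs kw f1 i mode chars names = extractAltLoop cs kw f2 i mode chars names := by
  have hk1 : 1 ≤ kw.length := List.length_pos_iff.mpr hk
  intro f1
  induction f1 with
  | zero => intro f2 i mode chars names h1 h2; omega
  | succ f ih =>
    intro f2 i mode chars names h1 h2
    cases f2 with
    | zero => omega
    | succ f2 =>
      simp only [extractAltLoop]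
      by_cases hi : i < cs.length
      · simp only [if_pos hi]
        cases mode with
        | none =>
          by_cases hc : kw.isPrefixOf (cs.drop i) = true ∧ i + kw.length < cs.length
          · simp only [if_pos hc]
            by_cases hq : cs.getD (i + kw.length) ' ' = '"' ∨ cs.getD (i + kw.length) ' ' = '\''
            · simp only [if_pos hq]; exact ih f2 _ _ _ _ (by omega) (by omega)
            · simp only [if_neg hq]; exact ih f2 _ _ _ _ (by omega) (by omega)
          · simp only [if_neg hc]; exact ih f2 _ _ _ _ (by omega) (by omega)
        | some q =>
          by_cases hb : cs.getD i ' ' = '\\' ∧ i + 1 < cs.length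
          · simp only [if_pos hb]; exact ih f2 _ _ _ _ (by omega) (by omega)
          · simp only [if_neg hb]
            by_cases hq : cs.getD i ' ' = q
            · simp only [if_pos hq]; exact ih f2 _ _ _ _ (by omega) (by omega)
            · simp only [if_neg hq]; exact ih f2 _ _ _ _ (by omega) (by omega)
      · simp only [if_neg hi]


-- one-step rewriting lemmas for BRun (each bumps the fuel back up via loopB_fuel)
theorem BRun_done (cs kw : List Char) (i : Nat) (chars : List Char) (names : PySem.Set String)
    (hi : ¬ i < cs.length) : BRun cs kw i none chars names = names := by
  unfold BRun
  conv_lhs => rw [extractAltLoop]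
  simp only [if_neg hi]

theorem BRun_doneRead (cs kw : List Char) (i : Nat) (q : Char) (chars : List Char)
    (names : PySem.Set String) (hi : ¬ i < cs.length) :
    BRun cs kw i (some q) chars names = pvFlush chars names := by
  unfold BRun pvFlush
  conv_lhs => rw [extractAltLoop]
  simp only [if_neg hi]

theorem BRun_miss (cs kw : List Char) (hk : kw ≠ []) (i : Nat) (chars : List Char)
    (names : PySem.Set String) (hi : i < cs.length)
    (hc : ¬ (kw.isPrefixOf (cs.drop i) = true ∧ i + kw.length < cs.length)) :
    BRun cs kw i none chars names = BRun cs kw (i + 1) none chars names := by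
  unfold BRun
  conv_lhs => rw [extractAltLoop]
  simp only [if_pos hi, if_neg hc]
  apply loopB_fuel cs kw hk <;> omega

theorem BRun_open (cs kw : List Char) (hk : kw ≠ []) (i : Nat) (chars : List Char)
    (names : PySem.Set String) (hi : i < cs.length)
    (hc : kw.isPrefixOf (cs.drop i) = true ∧ i + kw.length < cs.length)
    (hq : cs.getD (i + kw.length) ' ' = '"' ∨ cs.getD (i + kw.length) ' ' = '\'') :
    BRun cs kw i none chars names
      = BRun cs kw (i + kw.length + 1) (some (cs.getD (i + kw.length) ' ')) [] names := by
  unfold BRun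
  conv_lhs => rw [extractAltLoop]
  simp only [if_pos hi, if_pos hc, if_pos hq]
  apply loopB_fuel cs kw hk <;> omega

theorem BRun_noquote (cs kw : List Char) (hk : kw ≠ []) (i : Nat) (chars : List Char)
    (names : PySem.Set String) (hi : i < cs.length)
    (hc : kw.isPrefixOf (cs.drop i) = true ∧ i + kw.length < cs.length)
    (hq : ¬ (cs.getD (i + kw.length) ' ' = '"' ∨ cs.getD (i + kw.length) ' ' = '\'')) :
    BRun cs kw i none chars names = BRun cs kw (i + kw.length) none chars names := by
  have hk1 : 1 ≤ kw.length := List.length_pos_iff.mpr hk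
  unfold BRun
  conv_lhs => rw [extractAltLoop]
  simp only [if_pos hi, if_pos hc, if_neg hq]
  apply loopB_fuel cs kw hk <;> omega

theorem BRun_esc (cs kw : List Char) (hk : kw ≠ []) (i : Nat) (q : Char) (chars : List Char)
    (names : PySem.Set String) (hi : i < cs.length)
    (hb : cs.getD i ' ' = '\\' ∧ i + 1 < cs.length) :
    BRun cs kw i (some q) chars names = BRun cs kw (i + 2) (some q) chars names := by
  unfold BRun
  conv_lhs => rw [extractAltLoop]
  simp only [if_pos hi, if_pos hb]
  apply loopB_fuel cs kw hk <;> omega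

theorem BRun_close (cs kw : List Char) (hk : kw ≠ []) (i : Nat) (q : Char) (chars : List Char)
    (names : PySem.Set String) (hi : i < cs.length)
    (hb : ¬ (cs.getD i ' ' = '\\' ∧ i + 1 < cs.length)) (hq : cs.getD i ' ' = q) :
    BRun cs kw i (some q) chars names = BRun cs kw (i + 1) none [] (pvFlush chars names) := by
  unfold BRun pvFlush
  conv_lhs => rw [extractAltLoop]
  simp only [if_pos hi, if_neg hb, if_pos hq]
  apply loopB_fuel cs kw hk <;> omega

theorem BRun_char (cs kw : List Char) (hk : kw ≠ []) (i : Nat) (q : Char) (chars : List Char)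
    (names : PySem.Set String) (hi : i < cs.length)
    (hb : ¬ (cs.getD i ' ' = '\\' ∧ i + 1 < cs.length)) (hq : ¬ cs.getD i ' ' = q) :
    BRun cs kw i (some q) chars names
      = BRun cs kw (i + 1) (some q) (chars ++ [cs.getD i ' ']) names := by
  unfold BRun
  conv_lhs => rw [extractAltLoop]
  simp only [if_pos hi, if_neg hb, if_neg hq]
  apply loopB_fuel cs kw hk <;> omega

-- one-step rewriting lemmas for ARun
theorem ARun_done (cs kw : List Char) (idx : Nat) (names : PySem.Set String)
    (hpos : PySem.Chars.findFrom cs kw (idx : Int) none = -1) :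
    ARun cs kw idx names = names := by
  unfold ARun
  conv_lhs => rw [extractLoop]
  simp only [if_pos hpos]

theorem ARun_end (cs kw : List Char) (idx : Nat) (names : PySem.Set String)
    (hpos : ¬ PySem.Chars.findFrom cs kw (idx : Int) none = -1)
    (hs : ¬ (PySem.Chars.findFrom cs kw (idx : Int) none).toNat + kw.length < cs.length) :
    ARun cs kw idx names = names := by
  unfold ARun
  conv_lhs => rw [extractLoop]
  simp only [if_neg hpos, if_neg hs]

theorem ARun_noquote (cs kw : List Char) (hk : kw ≠ []) (idx : Nat) (names : PySem.Set String)
    (hpos : ¬ PySem.Chars.findFrom cs kw (idx : Int) none = -1)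
    (hs : (PySem.Chars.findFrom cs kw (idx : Int) none).toNat + kw.length < cs.length)
    (hq : cs.getD ((PySem.Chars.findFrom cs kw (idx : Int) none).toNat + kw.length) ' ' ≠ '"' ∧
          cs.getD ((PySem.Chars.findFrom cs kw (idx : Int) none).toNat + kw.length) ' ' ≠ '\'') :
    ARun cs kw idx names
      = ARun cs kw ((PySem.Chars.findFrom cs kw (idx : Int) none).toNat + kw.length) names := by
  have hk1 : 1 ≤ kw.length := List.length_pos_iff.mpr hk
  have hidx : idx ≤ cs.length := by
    by_contra hgt; exact hpos (findFrom_past cs kw idx (by omega))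
  obtain ⟨hge, -, -⟩ := PySem.Chars.findFrom_natCast_spec cs kw idx hidx hpos
  unfold ARun
  conv_lhs => rw [extractLoop]
  simp only [if_neg hpos, if_pos hs, if_pos hq]
  apply loopA_fuel cs kw hk <;> omega

theorem ARun_quote (cs kw : List Char) (hk : kw ≠ []) (idx : Nat) (names : PySem.Set String)
    (hpos : ¬ PySem.Chars.findFrom cs kw (idx : Int) none = -1)
    (hs : (PySem.Chars.findFrom cs kw (idx : Int) none).toNat + kw.length < cs.length)
    (hq : ¬ (cs.getD ((PySem.Chars.findFrom cs kw (idx : Int) none).toNat + kw.length) ' ' ≠ '"' ∧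
          cs.getD ((PySem.Chars.findFrom cs kw (idx : Int) none).toNat + kw.length) ' ' ≠ '\'')) :
    ARun cs kw idx names
      = ARun cs kw
          ((extractScan cs (cs.getD ((PySem.Chars.findFrom cs kw (idx : Int) none).toNat + kw.length) ' ')
            ((PySem.Chars.findFrom cs kw (idx : Int) none).toNat + kw.length + 1) []).1 + 1)
          (pvFlush (extractScan cs (cs.getD ((PySem.Chars.findFrom cs kw (idx : Int) none).toNat + kw.length) ' ')
            ((PySem.Chars.findFrom cs kw (idx : Int) none).toNat + kw.length + 1) []).2 names) := by
  have hk1 : 1 ≤ kw.length := List.length_pos_iff.mpr hk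
  have hidx : idx ≤ cs.length := by
    by_contra hgt; exact hpos (findFrom_past cs kw idx (by omega))
  obtain ⟨hge, -, -⟩ := PySem.Chars.findFrom_natCast_spec cs kw idx hidx hpos
  have hge2 := scan_ge cs (cs.getD ((PySem.Chars.findFrom cs kw (idx : Int) none).toNat + kw.length) ' ')
    ((PySem.Chars.findFrom cs kw (idx : Int) none).toNat + kw.length + 1) []
  have hle2 := scan_le cs (cs.getD ((PySem.Chars.findFrom cs kw (idx : Int) none).toNat + kw.length) ' ')
    ((PySem.Chars.findFrom cs kw (idx : Int) none).toNat + kw.length + 1) []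
  unfold ARun pvFlush
  conv_lhs => rw [extractLoop]
  simp only [if_neg hpos, if_pos hs, if_neg hq]
  apply loopA_fuel cs kw hk <;> omega

-- B in read mode computes exactly A's inner scanner, then flushes
theorem read_sim (cs kw : List Char) (hk : kw ≠ []) :
    ∀ (m i : Nat) (q : Char) (chars : List Char) (names : PySem.Set String),
    cs.length - i ≤ m →
    BRun cs kw i (some q) chars names =
      (if (extractScan cs q i chars).1 < cs.length
       then BRun cs kw ((extractScan cs q i chars).1 + 1) none []
              (pvFlush (extractScan cs q i chars).2 names)
       else pvFlush (extractScan cs q i chars).2 names) := by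
  intro m
  induction m with
  | zero =>
    intro i q chars names hm
    have hi : ¬ i < cs.length := by omega
    rw [extractScan, if_neg hi, BRun_doneRead cs kw i q chars names hi, if_neg hi]
  | succ m ih =>
    intro i q chars names hm
    by_cases hi : i < cs.length
    · rw [extractScan, if_pos hi]
      by_cases hb : cs.getD i ' ' = '\\' ∧ i + 1 < cs.length
      · simp only [if_pos hb]
        rw [BRun_esc cs kw hk i q chars names hi hb]
        exact ih (i + 2) q chars names (by omega)
      · simp only [if_neg hb]
        by_cases hq : cs.getD i ' ' = q
        · simp only [if_pos hq, if_pos hi]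
          exact BRun_close cs kw hk i q chars names hi hb hq
        · simp only [if_neg hq]
          rw [BRun_char cs kw hk i q chars names hi hb hq]
          exact ih (i + 1) q (chars ++ [cs.getD i ' ']) names (by omega)
    · rw [extractScan, if_neg hi, BRun_doneRead cs kw i q chars names hi, if_neg hi]

-- searching B walks over positions with no keyword match
theorem walk (cs kw : List Char) (hk : kw ≠ []) :
    ∀ (m i p : Nat) (chars : List Char) (names : PySem.Set String),
    i ≤ p → p - i ≤ m → p + kw.length ≤ cs.length →
    (∀ j, i ≤ j → j < p → ¬ kw <+: cs.drop j) →
    BRun cs kw i none chars names = BRun cs kw p none chars names := by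
  have hk1 : 1 ≤ kw.length := List.length_pos_iff.mpr hk
  intro m
  induction m with
  | zero =>
    intro i p chars names h1 h2 h3 hmin
    have : i = p := by omega
    rw [this]
  | succ m ih =>
    intro i p chars names h1 h2 h3 hmin
    by_cases hip : i = p
    · rw [hip]
    · have hlt : i < p := by omega
      have hi : i < cs.length := by omega
      have hc : ¬ (kw.isPrefixOf (cs.drop i) = true ∧ i + kw.length < cs.length) := by
        rintro ⟨hp, -⟩
        exact hmin i le_rfl hlt (List.isPrefixOf_iff_prefix.mp hp)
      rw [BRun_miss cs kw hk i chars names hi hc]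
      exact ih (i + 1) p chars names (by omega) (by omega) h3
        (fun j hj hj2 => hmin j (by omega) hj2)

-- searching B finds nothing when no keyword match remains
theorem noMatchRun (cs kw : List Char) (hk : kw ≠ []) :
    ∀ (m i : Nat) (chars : List Char) (names : PySem.Set String),
    cs.length - i ≤ m → (∀ j, i ≤ j → ¬ kw <+: cs.drop j) →
    BRun cs kw i none chars names = names := by
  intro m
  induction m with
  | zero =>
    intro i chars names hm hmin
    exact BRun_done cs kw i chars names (by omega)
  | succ m ih =>
    intro i chars names hm hmin
    by_cases hi : i < cs.length
    · have hc : ¬ (kw.isPrefixOf (cs.drop i) = true ∧ i + kw.length < cs.length) := by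
        rintro ⟨hp, -⟩
        exact hmin i le_rfl (List.isPrefixOf_iff_prefix.mp hp)
      rw [BRun_miss cs kw hk i chars names hi hc]
      exact ih (i + 1) chars names (by omega) (fun j hj => hmin j (by omega))
    · exact BRun_done cs kw i chars names hi

-- a keyword match at j ≥ idx yields an infix of the idx-suffix
theorem infix_of_match (cs kw : List Char) (idx j : Nat) (hj : idx ≤ j)
    (hp : kw <+: cs.drop j) : kw <:+: cs.drop idx := by
  have hsuf : cs.drop j <:+ cs.drop idx := by
    have : List.drop (j - idx) (List.drop idx cs) = List.drop j cs := by
      rw [List.drop_drop]; congr 1; omega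
    rw [← this]
    exact List.drop_suffix (j - idx) (List.drop idx cs)
  exact hp.isInfix.trans hsuf.isInfix

-- MAIN SIMULATION: B's state machine equals A's find-driven loop from any search position
theorem main_sim (cs kw : List Char) (hk : kw ≠ []) :
    ∀ (m idx : Nat) (chars : List Char) (names : PySem.Set String),
    cs.length + 2 - idx ≤ m → idx ≤ cs.length + 1 →
    BRun cs kw idx none chars names = ARun cs kw idx names := by
  have hk1 : 1 ≤ kw.length := List.length_pos_iff.mpr hk
  intro m
  induction m with
  | zero => intro idx chars names hm hidx; omega
  | succ m ih =>
    intro idx chars names hm hidx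
    by_cases hpos : PySem.Chars.findFrom cs kw (idx : Int) none = -1
    · rw [ARun_done cs kw idx names hpos]
      apply noMatchRun cs kw hk cs.length idx chars names (by omega)
      intro j hj hp
      have hjk : kw.length ≤ cs.length - j := by
        have := hp.length_le; simpa using this
      have hidx2 : idx ≤ cs.length := by omega
      exact (PySem.Chars.findFrom_natCast_eq_neg_one_iff cs kw idx hidx2).mp hpos
        (infix_of_match cs kw idx j hj hp)
    · have hidx2 : idx ≤ cs.length := by
        by_contra hgt; exact hpos (findFrom_past cs kw idx (by omega))
      obtain ⟨hge, hpre, hmin⟩ := PySem.Chars.findFrom_natCast_spec cs kw idx hidx2 hpos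
      set P := (PySem.Chars.findFrom cs kw (idx : Int) none).toNat with hPdef
      have hgeN : idx ≤ P := by omega
      have hPk : P + kw.length ≤ cs.length := by
        have := hpre.length_le; simp only [List.length_drop] at this; omega
      have hwalk := walk cs kw hk P idx P chars names hgeN (by omega) hPk hmin
      rw [hwalk]
      have hP : P < cs.length := by omega
      by_cases hs : P + kw.length < cs.length
      · by_cases hq : cs.getD (P + kw.length) ' ' = '"' ∨ cs.getD (P + kw.length) ' ' = '\''
        · rw [BRun_open cs kw hk P chars names hP
            ⟨List.isPrefixOf_iff_prefix.mpr hpre, hs⟩ hq]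
          rw [read_sim cs kw hk cs.length (P + kw.length + 1)
            (cs.getD (P + kw.length) ' ') [] names (by omega)]
          rw [ARun_quote cs kw hk idx names hpos hs (by tauto)]
          set p := extractScan cs (cs.getD (P + kw.length) ' ') (P + kw.length + 1) [] with hpdef
          have hge2 := scan_ge cs (cs.getD (P + kw.length) ' ') (P + kw.length + 1) []
          have hle2 := scan_le cs (cs.getD (P + kw.length) ' ') (P + kw.length + 1) []
          rw [← hpdef] at hge2 hle2
          by_cases hfin : p.1 < cs.length
          · rw [if_pos hfin]
            exact ih (p.1 + 1) [] (pvFlush p.2 names) (by omega) (by omega)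
          · rw [if_neg hfin]
            rw [ARun_done cs kw (p.1 + 1) (pvFlush p.2 names)
              (findFrom_past cs kw (p.1 + 1) (by omega))]
        · rw [BRun_noquote cs kw hk P chars names hP
            ⟨List.isPrefixOf_iff_prefix.mpr hpre, hs⟩ hq]
          rw [ARun_noquote cs kw hk idx names hpos hs (by tauto)]
          exact ih (P + kw.length) chars names (by omega) (by omega)
      · rw [ARun_end cs kw idx names hpos hs]
        have hc : ¬ (kw.isPrefixOf (cs.drop P) = true ∧ P + kw.length < cs.length) := by
          rintro ⟨-, h2⟩; exact hs h2
        rw [BRun_miss cs kw hk P chars names hP hc]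
        apply noMatchRun cs kw hk cs.length (P + 1) chars names (by omega)
        intro j hj hp
        have := hp.length_le
        simp only [List.length_drop] at this
        omega

-- ===== VERDICT (by name: the statement is the Claim_ definition above) =====
theorem extract_spec : Claim_equal_extract := by
  intro text keyword hdom hpre
  unfold Spec_extract
  have hk : keyword.toList ≠ [] := by
    intro h; exact hpre (String.toList_eq_nil_iff.mp h)
  exact (main_sim text.toList keyword.toList hk (text.toList.length + 2) 0 []
    PySem.Set.empty (by omega) (by omega)).symm
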